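-- pv_equiv track=rewrite | github.com/kmzn128/atcoder | b160/e.py | Main
-- ===== SOURCE A (Python) =====
-- def Main(X, Y, A, B, C, p, q, r):
--     p.sort()
--     q.sort()
--     r.sort()
--     ans = 0
--     p = p[-X:]
--     q = q[-Y:]
--     wa = X+Y
--     for i in range(wa):
--         if(len(r) and len(p) and len(q)):
--             if p[-1] < r[-1] and q[-1] < r[-1]:
--                 ans += r.pop()
--             elif p[-1] < q[-1]:
--                 ans += q.pop()
--             else:
--                 ans += p.pop()
--         elif(len(r) == 0 and len(p) and len(q)):
--             if p[-1] < q[-1]: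
--                 ans += q.pop()
--             else:
--                 ans += p.pop()
--         elif(len(r) and len(p)==0 and len(q)):
--             if q[-1] < r[-1]:
--                 ans += r.pop()
--             else:
--                 ans += q.pop()
--         elif(len(r) and len(p) and len(q)==0):
--             if p[-1] < r[-1]:
--                 ans += r.pop()
--             else:
--                 ans += p.pop()
--         elif(len(r)==0 and len(p)==0 and len(q)):
--             ans += q.pop()
--         elif(len(r)==0 and len(p) and len(q)==0):
--             ans += p.pop()
--         elif(len(r) and len(p)==0 and len(q)==0):
--             ans += r.pop()
--     return ans
-- ===== SOURCE B (Python) =====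
-- # Concatenate the X best of p, the Y best of q and all of r, sort the pool
-- # descending once, and sum its first X+Y elements (return value only; unlike A
-- # this does not mutate p, q, r).
-- def Main(X, Y, A, B, C, p, q, r):
--     k = X + Y
--     if k <= 0:
--         return 0
--     pool = sorted(p)[-X:] + sorted(q)[-Y:] + r
--     pool.sort(reverse=True)
--     return sum(pool[:k])
-- ===== Notes on version B (the rewrite author's own statement) =====
-- stated objective: simpler
-- what changed: A runs an X+Y-step greedy three-way merge popping the largest tail among the three sorted lists with an eight-way case analysis; B just concatenates the X best of p, the Y best of q and all of r, sorts the pool descending once and sums its first X+Y elements.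
import Mathlib
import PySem

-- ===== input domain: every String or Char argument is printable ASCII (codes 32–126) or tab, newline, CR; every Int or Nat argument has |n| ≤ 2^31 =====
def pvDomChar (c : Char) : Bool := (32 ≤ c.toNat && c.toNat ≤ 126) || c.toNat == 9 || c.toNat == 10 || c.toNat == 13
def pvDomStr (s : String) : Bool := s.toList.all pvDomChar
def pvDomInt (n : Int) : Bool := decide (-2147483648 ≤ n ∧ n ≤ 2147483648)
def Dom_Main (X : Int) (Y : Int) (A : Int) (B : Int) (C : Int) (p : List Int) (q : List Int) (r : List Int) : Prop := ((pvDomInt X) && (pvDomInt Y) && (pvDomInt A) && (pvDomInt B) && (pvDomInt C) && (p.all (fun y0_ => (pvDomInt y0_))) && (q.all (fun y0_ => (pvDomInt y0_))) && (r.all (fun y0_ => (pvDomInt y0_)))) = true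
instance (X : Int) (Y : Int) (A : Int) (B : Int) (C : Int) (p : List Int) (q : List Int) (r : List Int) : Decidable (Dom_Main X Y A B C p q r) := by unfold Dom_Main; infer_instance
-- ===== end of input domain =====

-- B replaces A's X+Y-step greedy three-way merge by one descending sort of the pooled
-- candidates followed by a prefix sum (simpler; return value only — A sorts/pops its
-- list arguments in place, B does not mutate them).

-- ===== PORT A =====
-- one iteration of A's loop body on the state (ans, p, q, r);
-- l[-1] under a nonemptiness guard is PySem.List.pyGetD l (-1) 0, and l.pop() under the
-- same guard is exactly "add l[-1], keep l.dropLast".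
def stepA (s : Int × List Int × List Int × List Int) : Int × List Int × List Int × List Int :=
  match s with
  | (ans, p, q, r) =>
    if r.length ≠ 0 ∧ p.length ≠ 0 ∧ q.length ≠ 0 then
      if PySem.List.pyGetD p (-1) 0 < PySem.List.pyGetD r (-1) 0 ∧ PySem.List.pyGetD q (-1) 0 < PySem.List.pyGetD r (-1) 0 then
        (ans + PySem.List.pyGetD r (-1) 0, p, q, r.dropLast)
      else if PySem.List.pyGetD p (-1) 0 < PySem.List.pyGetD q (-1) 0 then
        (ans + PySem.List.pyGetD q (-1) 0, p, q.dropLast, r)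
      else
        (ans + PySem.List.pyGetD p (-1) 0, p.dropLast, q, r)
    else if r.length = 0 ∧ p.length ≠ 0 ∧ q.length ≠ 0 then
      if PySem.List.pyGetD p (-1) 0 < PySem.List.pyGetD q (-1) 0 then
        (ans + PySem.List.pyGetD q (-1) 0, p, q.dropLast, r)
      else
        (ans + PySem.List.pyGetD p (-1) 0, p.dropLast, q, r)
    else if r.length ≠ 0 ∧ p.length = 0 ∧ q.length ≠ 0 then
      if PySem.List.pyGetD q (-1) 0 < PySem.List.pyGetD r (-1) 0 then
        (ans + PySem.List.pyGetD r (-1) 0, p, q, r.dropLast)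
      else
        (ans + PySem.List.pyGetD q (-1) 0, p, q.dropLast, r)
    else if r.length ≠ 0 ∧ p.length ≠ 0 ∧ q.length = 0 then
      if PySem.List.pyGetD p (-1) 0 < PySem.List.pyGetD r (-1) 0 then
        (ans + PySem.List.pyGetD r (-1) 0, p, q, r.dropLast)
      else
        (ans + PySem.List.pyGetD p (-1) 0, p.dropLast, q, r)
    else if r.length = 0 ∧ p.length = 0 ∧ q.length ≠ 0 then
      (ans + PySem.List.pyGetD q (-1) 0, p, q.dropLast, r)
    else if r.length = 0 ∧ p.length ≠ 0 ∧ q.length = 0 then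
      (ans + PySem.List.pyGetD p (-1) 0, p.dropLast, q, r)
    else if r.length ≠ 0 ∧ p.length = 0 ∧ q.length = 0 then
      (ans + PySem.List.pyGetD r (-1) 0, p, q, r.dropLast)
    else
      (ans, p, q, r)

def Main (X : Int) (Y : Int) (A : Int) (B : Int) (C : Int) (p : List Int) (q : List Int) (r : List Int) : Int :=
  let p1 := PySem.List.sorted p (fun x => x) false
  let q1 := PySem.List.sorted q (fun x => x) false
  let r1 := PySem.List.sorted r (fun x => x) false
  let p2 := PySem.List.slice p1 (some (-X)) none
  let q2 := PySem.List.slice q1 (some (-Y)) none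
  let wa := X + Y
  ((PySem.List.pyRange 0 wa 1).foldl (fun s _ => stepA s) ((0 : Int), p2, q2, r1)).1

-- ===== PORT B =====
def Main_alt (X : Int) (Y : Int) (A : Int) (B : Int) (C : Int) (p : List Int) (q : List Int) (r : List Int) : Int :=
  let k := X + Y
  if k ≤ 0 then 0
  else
    let pool := PySem.List.slice (PySem.List.sorted p (fun x => x) false) (some (-X)) none
                ++ PySem.List.slice (PySem.List.sorted q (fun x => x) false) (some (-Y)) none ++ r
    let pool2 := PySem.List.sorted pool (fun x => x) true
    (PySem.List.slice pool2 none (some k)).sum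

-- ===== PRECONDITION & SPEC =====
def Spec_Main (X : Int) (Y : Int) (A : Int) (B : Int) (C : Int) (p : List Int) (q : List Int) (r : List Int) (out : Int) : Prop := out = Main_alt X Y A B C p q r
instance (X : Int) (Y : Int) (A : Int) (B : Int) (C : Int) (p : List Int) (q : List Int) (r : List Int) (out : Int) : Decidable (Spec_Main X Y A B C p q r out) := by unfold Spec_Main; infer_instance

-- ===== CLAIM (what is proved, stated in full; the proofs are below) =====
def Claim_equal_Main : Prop := ∀ (X : Int) (Y : Int) (A : Int) (B : Int) (C : Int) (p : List Int) (q : List Int) (r : List Int), Dom_Main X Y A B C p q r → Spec_Main X Y A B C p q r (Main X Y A B C p q r)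

-- ===== LEMMAS AND PROOFS =====

-- the descending sort both sides reduce to
def sd (l : List Int) : List Int := PySem.List.sorted l (fun x => x) true

theorem sd_pairwise (l : List Int) : (sd l).Pairwise (fun a b : Int => b ≤ a) :=
  PySem.List.sorted_pairwise_rev l (fun x => x)

theorem sd_eq_of_perm {l l' : List Int} (h : l.Perm l') : sd l = sd l' :=
  List.Perm.eq_of_pairwise (fun _ _ _ _ h1 h2 => le_antisymm h2 h1)
    (sd_pairwise l) (sd_pairwise l')
    (((PySem.List.sorted_perm l _ _).trans h).trans (PySem.List.sorted_perm l' _ _).symm)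

theorem sd_cons_max (m : Int) (t : List Int) (hm : ∀ x ∈ t, x ≤ m) : sd (m :: t) = m :: sd t := by
  refine List.Perm.eq_of_pairwise (fun _ _ _ _ h1 h2 => le_antisymm h2 h1) (sd_pairwise _) ?_ ?_
  · refine List.pairwise_cons.2 ⟨?_, sd_pairwise t⟩
    intro x hx
    exact hm x ((PySem.List.mem_sorted _ _ _ _).1 hx)
  · exact (PySem.List.sorted_perm _ _ _).trans ((PySem.List.sorted_perm t _ _).symm.cons m)

theorem topSum_step (m : Int) (pool t : List Int) (hperm : pool.Perm (m :: t))
    (hm : ∀ x ∈ pool, x ≤ m) (n : Nat) :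
    ((sd pool).take (n+1)).sum = m + ((sd t).take n).sum := by
  have ht : ∀ x ∈ t, x ≤ m := fun x hx => hm x (hperm.symm.subset (by simp [hx]))
  rw [sd_eq_of_perm hperm, sd_cons_max m t ht, List.take_succ_cons, List.sum_cons]

theorem le_getLast_of_asc {l : List Int} (h : l ≠ []) (hs : l.Pairwise (· ≤ ·)) :
    ∀ x ∈ l, x ≤ l.getLast h := by
  intro x hx
  have := List.dropLast_append_getLast h
  rw [← this] at hx hs
  rcases List.mem_append.1 hx with h1 | h1
  · exact (List.pairwise_append.1 hs).2.2 x h1 _ (by simp)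
  · simp at h1; simp [h1]

theorem pool_le (p q r : List Int) (m : Int)
    (h1 : ∀ h : p ≠ [], p.getLast h ≤ m)
    (h2 : ∀ h : q ≠ [], q.getLast h ≤ m)
    (h3 : ∀ h : r ≠ [], r.getLast h ≤ m)
    (hp : p.Pairwise (· ≤ ·)) (hq : q.Pairwise (· ≤ ·)) (hr : r.Pairwise (· ≤ ·)) :
    ∀ x ∈ p ++ q ++ r, x ≤ m := by
  intro x hx
  rcases List.mem_append.1 hx with hx' | hx'
  · rcases List.mem_append.1 hx' with hx'' | hx''
    · have hne : p ≠ [] := by rintro rfl; simp at hx''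
      exact le_trans (le_getLast_of_asc hne hp x hx'') (h1 hne)
    · have hne : q ≠ [] := by rintro rfl; simp at hx''
      exact le_trans (le_getLast_of_asc hne hq x hx'') (h2 hne)
  · have hne : r ≠ [] := by rintro rfl; simp at hx'
    exact le_trans (le_getLast_of_asc hne hr x hx') (h3 hne)

theorem perm_pop_r (p q r : List Int) (h : r ≠ []) :
    (p ++ q ++ r).Perm (r.getLast h :: (p ++ q ++ r.dropLast)) := by
  conv_lhs => rw [← List.dropLast_append_getLast h]
  rw [List.perm_iff_count]; intro a
  simp [List.count_append, List.count_cons]; omega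

theorem perm_pop_q (p q r : List Int) (h : q ≠ []) :
    (p ++ q ++ r).Perm (q.getLast h :: (p ++ q.dropLast ++ r)) := by
  conv_lhs => rw [← List.dropLast_append_getLast h]
  rw [List.perm_iff_count]; intro a
  simp [List.count_append, List.count_cons]; omega

theorem perm_pop_p (p q r : List Int) (h : p ≠ []) :
    (p ++ q ++ r).Perm (p.getLast h :: (p.dropLast ++ q ++ r)) := by
  conv_lhs => rw [← List.dropLast_append_getLast h]
  rw [List.perm_iff_count]; intro a
  simp [List.count_append, List.count_cons]; omega

theorem foldl_const_iterate {α β : Type} (f : α → α) (l : List β) (init : α) :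
    l.foldl (fun s _ => f s) init = f^[l.length] init := by
  induction l generalizing init with
  | nil => rfl
  | cons x xs ih => simp [List.foldl_cons, ih, Function.iterate_succ_apply]

-- the common step: after picking a maximal element m and removing it, the tail loop
-- accounts for the remaining n largest
theorem pick_step (n : Nat)
    (ih : ∀ (ans : Int) (p q r : List Int),
      p.Pairwise (· ≤ ·) → q.Pairwise (· ≤ ·) → r.Pairwise (· ≤ ·) →
      (stepA^[n] (ans, p, q, r)).1 = ans + ((sd (p ++ q ++ r)).take n).sum)
    (ans m : Int) (p q r p' q' r' : List Int)
    (hperm : (p ++ q ++ r).Perm (m :: (p' ++ q' ++ r')))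
    (hm : ∀ x ∈ p ++ q ++ r, x ≤ m)
    (hp' : p'.Pairwise (· ≤ ·)) (hq' : q'.Pairwise (· ≤ ·)) (hr' : r'.Pairwise (· ≤ ·)) :
    (stepA^[n] (ans + m, p', q', r')).1 = ans + ((sd (p ++ q ++ r)).take (n + 1)).sum := by
  rw [ih _ _ _ _ hp' hq' hr', topSum_step m _ _ hperm hm n]; ring

theorem loopA_eq (n : Nat) : ∀ (ans : Int) (p q r : List Int),
    p.Pairwise (· ≤ ·) → q.Pairwise (· ≤ ·) → r.Pairwise (· ≤ ·) →
    (stepA^[n] (ans, p, q, r)).1 = ans + ((sd (p ++ q ++ r)).take n).sum := by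
  induction n with
  | zero => intro ans p q r _ _ _; simp
  | succ n ih =>
    intro ans p q r hp hq hr
    rw [Function.iterate_succ_apply]
    have hp' := List.Pairwise.sublist p.dropLast_sublist hp
    have hq' := List.Pairwise.sublist q.dropLast_sublist hq
    have hr' := List.Pairwise.sublist r.dropLast_sublist hr
    by_cases hrE : r = [] <;> by_cases hpE : p = [] <;> by_cases hqE : q = []
    · -- all empty
      subst hrE hpE hqE
      have h0 : sd ([] ++ [] ++ []) = ([] : List Int) := (PySem.List.sorted_eq_nil_iff _ _ _).2 rfl
      have hstep : stepA (ans, [], [], []) = (ans, ([] : List Int), ([] : List Int), ([] : List Int)) := by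
        simp [stepA]
      rw [hstep, ih _ _ _ _ hp hq hr, h0]; simp
    · -- r=[], p=[], q≠[]
      subst hrE hpE
      have hql := le_getLast_of_asc hqE hq
      have hstep : stepA (ans, [], q, []) = (ans + q.getLast hqE, ([] : List Int), q.dropLast, ([] : List Int)) := by
        simp [stepA, hqE, PySem.List.pyGetD_neg_one q 0 hqE]
      rw [hstep]
      exact pick_step n ih ans _ [] q [] [] q.dropLast []
        (perm_pop_q [] q [] hqE)
        (pool_le [] q [] _ (by simp) (fun h => le_refl _) (by simp) hp hq hr)
        hp hq' hr
    · -- r=[], p≠[], q=[]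
      subst hrE hqE
      have hstep : stepA (ans, p, [], []) = (ans + p.getLast hpE, p.dropLast, ([] : List Int), ([] : List Int)) := by
        simp [stepA, hpE, PySem.List.pyGetD_neg_one p 0 hpE]
      rw [hstep]
      exact pick_step n ih ans _ p [] [] p.dropLast [] []
        (perm_pop_p p [] [] hpE)
        (pool_le p [] [] _ (fun h => le_refl _) (by simp) (by simp) hp hq hr)
        hp' hq hr
    · -- r=[], p≠[], q≠[]
      subst hrE
      have e1 : PySem.List.pyGetD p (-1) 0 = p.getLast hpE := PySem.List.pyGetD_neg_one p 0 hpE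
      have e2 : PySem.List.pyGetD q (-1) 0 = q.getLast hqE := PySem.List.pyGetD_neg_one q 0 hqE
      by_cases h2 : p.getLast hpE < q.getLast hqE
      · have hstep : stepA (ans, p, q, []) = (ans + q.getLast hqE, p, q.dropLast, ([] : List Int)) := by
          simp [stepA, hpE, hqE, e1, e2, h2]
        rw [hstep]
        exact pick_step n ih ans _ p q [] p q.dropLast []
          (perm_pop_q p q [] hqE)
          (pool_le p q [] _ (fun h => le_of_lt h2) (fun h => le_refl _) (by simp) hp hq hr)
          hp hq' hr
      · have hstep : stepA (ans, p, q, []) = (ans + p.getLast hpE, p.dropLast, q, ([] : List Int)) := by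
          simp [stepA, hpE, hqE, e1, e2, h2]
        rw [hstep]
        exact pick_step n ih ans _ p q [] p.dropLast q []
          (perm_pop_p p q [] hpE)
          (pool_le p q [] _ (fun h => le_refl _) (fun h => le_of_not_gt h2) (by simp) hp hq hr)
          hp' hq hr
    · -- r≠[], p=[], q=[]
      subst hpE hqE
      have hstep : stepA (ans, [], [], r) = (ans + r.getLast hrE, ([] : List Int), ([] : List Int), r.dropLast) := by
        simp [stepA, hrE, PySem.List.pyGetD_neg_one r 0 hrE]
      rw [hstep]
      exact pick_step n ih ans _ [] [] r [] [] r.dropLast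
        (perm_pop_r [] [] r hrE)
        (pool_le [] [] r _ (by simp) (by simp) (fun h => le_refl _) hp hq hr)
        hp hq hr'
    · -- r≠[], p=[], q≠[]
      subst hpE
      have e2 : PySem.List.pyGetD q (-1) 0 = q.getLast hqE := PySem.List.pyGetD_neg_one q 0 hqE
      have e3 : PySem.List.pyGetD r (-1) 0 = r.getLast hrE := PySem.List.pyGetD_neg_one r 0 hrE
      by_cases h2 : q.getLast hqE < r.getLast hrE
      · have hstep : stepA (ans, [], q, r) = (ans + r.getLast hrE, ([] : List Int), q, r.dropLast) := by
          simp [stepA, hqE, hrE, e2, e3, h2]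
        rw [hstep]
        exact pick_step n ih ans _ [] q r [] q r.dropLast
          (perm_pop_r [] q r hrE)
          (pool_le [] q r _ (by simp) (fun h => le_of_lt h2) (fun h => le_refl _) hp hq hr)
          hp hq hr'
      · have hstep : stepA (ans, [], q, r) = (ans + q.getLast hqE, ([] : List Int), q.dropLast, r) := by
          simp [stepA, hqE, hrE, e2, e3, h2]
        rw [hstep]
        exact pick_step n ih ans _ [] q r [] q.dropLast r
          (perm_pop_q [] q r hqE)
          (pool_le [] q r _ (by simp) (fun h => le_refl _) (fun h => le_of_not_gt h2) hp hq hr)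
          hp hq' hr
    · -- r≠[], p≠[], q=[]
      subst hqE
      have e1 : PySem.List.pyGetD p (-1) 0 = p.getLast hpE := PySem.List.pyGetD_neg_one p 0 hpE
      have e3 : PySem.List.pyGetD r (-1) 0 = r.getLast hrE := PySem.List.pyGetD_neg_one r 0 hrE
      by_cases h2 : p.getLast hpE < r.getLast hrE
      · have hstep : stepA (ans, p, [], r) = (ans + r.getLast hrE, p, ([] : List Int), r.dropLast) := by
          simp [stepA, hpE, hrE, e1, e3, h2]
        rw [hstep]
        exact pick_step n ih ans _ p [] r p [] r.dropLast
          (perm_pop_r p [] r hrE)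
          (pool_le p [] r _ (fun h => le_of_lt h2) (by simp) (fun h => le_refl _) hp hq hr)
          hp hq hr'
      · have hstep : stepA (ans, p, [], r) = (ans + p.getLast hpE, p.dropLast, ([] : List Int), r) := by
          simp [stepA, hpE, hrE, e1, e3, h2]
        rw [hstep]
        exact pick_step n ih ans _ p [] r p.dropLast [] r
          (perm_pop_p p [] r hpE)
          (pool_le p [] r _ (fun h => le_refl _) (by simp) (fun h => le_of_not_gt h2) hp hq hr)
          hp' hq hr
    · -- all nonempty
      have e1 : PySem.List.pyGetD p (-1) 0 = p.getLast hpE := PySem.List.pyGetD_neg_one p 0 hpE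
      have e2 : PySem.List.pyGetD q (-1) 0 = q.getLast hqE := PySem.List.pyGetD_neg_one q 0 hqE
      have e3 : PySem.List.pyGetD r (-1) 0 = r.getLast hrE := PySem.List.pyGetD_neg_one r 0 hrE
      by_cases h1 : p.getLast hpE < r.getLast hrE ∧ q.getLast hqE < r.getLast hrE
      · have hstep : stepA (ans, p, q, r) = (ans + r.getLast hrE, p, q, r.dropLast) := by
          simp [stepA, hpE, hqE, hrE, e1, e2, e3, h1]
        rw [hstep]
        exact pick_step n ih ans _ p q r p q r.dropLast
          (perm_pop_r p q r hrE)
          (pool_le p q r _ (fun h => le_of_lt h1.1) (fun h => le_of_lt h1.2) (fun h => le_refl _) hp hq hr)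
          hp hq hr'
      · by_cases h2 : p.getLast hpE < q.getLast hqE
        · have hstep : stepA (ans, p, q, r) = (ans + q.getLast hqE, p, q.dropLast, r) := by
            simp [stepA, hpE, hqE, hrE, e1, e2, e3, h1, h2]
          rw [hstep]
          have hrq : r.getLast hrE ≤ q.getLast hqE := by
            by_contra hc
            exact h1 ⟨lt_of_lt_of_le h2 (le_of_not_ge hc), lt_of_not_ge hc⟩
          exact pick_step n ih ans _ p q r p q.dropLast r
            (perm_pop_q p q r hqE)
            (pool_le p q r _ (fun h => le_of_lt h2) (fun h => le_refl _) (fun h => hrq) hp hq hr)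
            hp hq' hr
        · have hstep : stepA (ans, p, q, r) = (ans + p.getLast hpE, p.dropLast, q, r) := by
            simp [stepA, hpE, hqE, hrE, e1, e2, e3, h1, h2]
          rw [hstep]
          have hqp : q.getLast hqE ≤ p.getLast hpE := le_of_not_gt h2
          have hrp : r.getLast hrE ≤ p.getLast hpE := by
            by_contra hc
            exact h1 ⟨lt_of_not_ge hc, lt_of_le_of_lt hqp (lt_of_not_ge hc)⟩
          exact pick_step n ih ans _ p q r p.dropLast q r
            (perm_pop_p p q r hpE)
            (pool_le p q r _ (fun h => le_refl _) (fun h => hqp) (fun h => hrp) hp hq hr)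
            hp' hq hr

theorem Main_spec : Claim_equal_Main := by
  unfold Claim_equal_Main
  intro X Y A B C p q r _
  show Main X Y A B C p q r = Main_alt X Y A B C p q r
  have hP : (PySem.List.slice (PySem.List.sorted p (fun x => x) false) (some (-X)) none).Pairwise (· ≤ ·) := by
    rw [PySem.List.slice_some_none]
    exact List.Pairwise.sublist (List.drop_sublist _ _) (PySem.List.sorted_pairwise p (fun x => x))
  have hQ : (PySem.List.slice (PySem.List.sorted q (fun x => x) false) (some (-Y)) none).Pairwise (· ≤ ·) := by
    rw [PySem.List.slice_some_none]
    exact List.Pairwise.sublist (List.drop_sublist _ _) (PySem.List.sorted_pairwise q (fun x => x))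
  have hR : (PySem.List.sorted r (fun x => x) false).Pairwise (· ≤ ·) :=
    PySem.List.sorted_pairwise r (fun x => x)
  simp only [Main, Main_alt]
  rw [foldl_const_iterate, PySem.List.length_pyRange_one,
    loopA_eq _ 0 _ _ _ hP hQ hR, zero_add]
  have hperm : sd (PySem.List.slice (PySem.List.sorted p (fun x => x) false) (some (-X)) none ++
      PySem.List.slice (PySem.List.sorted q (fun x => x) false) (some (-Y)) none ++
      PySem.List.sorted r (fun x => x) false)
      = sd (PySem.List.slice (PySem.List.sorted p (fun x => x) false) (some (-X)) none ++
      PySem.List.slice (PySem.List.sorted q (fun x => x) false) (some (-Y)) none ++ r) :=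
    sd_eq_of_perm (List.Perm.append_left _ (PySem.List.sorted_perm r _ _))
  simp only [sd] at hperm ⊢
  rw [hperm]
  by_cases hk : X + Y ≤ 0
  · have h0 : (X + Y).toNat = 0 := by omega
    simp [hk, h0]
  · rw [if_neg hk, PySem.List.slice_to _ (by omega : (0:Int) ≤ X + Y)]
    norm_num
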